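-- pv_equiv track=rewrite | github.com/VaruTudor/Fundamentals-of-Programming | Lab03_layered_architecture_without_classes/nonUI3_4.py | filter_real
-- ===== SOURCE A (Python) =====
-- def get_complex(n):
--     '''
--     returns the real part of a complex number given
--     '''
--     return n[1]
--
-- def remove(NumberList,pos,undoList):
--     '''
--     description: removes a number from the list at a given position
--     params:
--         NumberList - the list of numbers
--         pos - an integer which tells whih position to be removed
--     output:
--         The updated list
--     '''
--     undoList.append(NumberList[:])
--     del NumberList[pos]
--     return (NumberList,undoList)
--
-- def filter_real(numberList,undoList):
--     '''
--     removes non-real elements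
--     params:
--         numberList - a list of complex number represented as lists
--     output:
--         the updated list
--     '''
--     undoList.append(numberList[:])
--     i=0
--     while i<len(numberList):
--         if get_complex(numberList[i])!=0:
--             remove(numberList,i,[])
--         else:
--             i+=1
--     return (numberList,undoList)
-- ===== SOURCE B (Python) =====
-- def filter_real(numberList, undoList):
--     undoList.append(numberList[:])
--     w = 0
--     for r in range(len(numberList)):
--         if numberList[r][1] == 0:
--             numberList[w] = numberList[r]
--             w += 1
--     del numberList[w:]
--     return (numberList, undoList)
-- ===== Notes on version B (the rewrite author's own statement) =====
-- stated objective: alternative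
-- what changed: Replaces A's while-loop that repeatedly deletes elements in place (del numberList[i], re-examining the same index) by a single forward two-pointer compaction pass (write index w, read index r) followed by one tail truncation.
import Mathlib
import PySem

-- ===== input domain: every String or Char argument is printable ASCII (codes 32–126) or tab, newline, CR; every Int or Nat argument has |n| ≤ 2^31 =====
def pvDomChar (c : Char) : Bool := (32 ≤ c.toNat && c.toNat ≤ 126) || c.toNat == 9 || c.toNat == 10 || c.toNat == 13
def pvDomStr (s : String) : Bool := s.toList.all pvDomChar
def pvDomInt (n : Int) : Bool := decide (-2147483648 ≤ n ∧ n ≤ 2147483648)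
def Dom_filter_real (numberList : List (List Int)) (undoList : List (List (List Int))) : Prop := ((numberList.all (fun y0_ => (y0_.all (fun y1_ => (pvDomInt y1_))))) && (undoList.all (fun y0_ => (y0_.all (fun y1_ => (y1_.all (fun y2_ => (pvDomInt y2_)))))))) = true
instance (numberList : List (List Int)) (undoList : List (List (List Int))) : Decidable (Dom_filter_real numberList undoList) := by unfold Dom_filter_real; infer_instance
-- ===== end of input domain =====

-- B replaces A's repeated in-place del by one two-pointer compaction pass with a single tail
-- truncation; equivalence is about the RETURN value only (both Pythons mutate numberList and undoList
-- in place; B performs the same kind of in-place mutation).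

-- ===== PORT A =====
-- get_complex(n) = n[1]
def pvGetComplex (n : List Int) : Option Int := PySem.List.pyGet? n 1

-- A's while loop: index i over the (shrinking) list; del numberList[i] on non-real entries.
-- The 'none' branch is where Python raises IndexError (inner list shorter than 2): excluded by Pre_.
def pvFilterLoopA (lst : List (List Int)) (i : Nat) : List (List Int) :=
  if h : i < lst.length then
    match pvGetComplex lst[i] with
    | some v => if v ≠ 0 then pvFilterLoopA (lst.eraseIdx i) i else pvFilterLoopA lst (i + 1)
    | none => lst
  else lst
termination_by lst.length - i
decreasing_by
  · simp [List.length_eraseIdx, h]; omega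
  · omega

def filter_real (numberList : List (List Int)) (undoList : List (List (List Int))) : List (List Int) × List (List (List Int)) :=
  (pvFilterLoopA numberList 0, undoList ++ [numberList])

-- ===== PORT B =====
-- B's for loop over r in range(n): two-pointer compaction (write index w, read index r);
-- the 'none' branch is Python's IndexError, excluded by Pre_.
def pvFilterLoopB (arr : List (List Int)) (w r n : Nat) : List (List Int) × Nat :=
  if r < n then
    match PySem.List.pyGet? (arr.getD r []) 1 with
    | some v =>
      if v = 0 then pvFilterLoopB (arr.set w (arr.getD r [])) (w + 1) (r + 1) n
      else pvFilterLoopB arr w (r + 1) n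
    | none => (arr, w)
  else (arr, w)
termination_by n - r

def filter_real_alt (numberList : List (List Int)) (undoList : List (List (List Int))) : List (List Int) × List (List (List Int)) :=
  ((pvFilterLoopB numberList 0 0 numberList.length).1.take
    (pvFilterLoopB numberList 0 0 numberList.length).2,  -- del numberList[w:]
   undoList ++ [numberList])

-- ===== PRECONDITION & SPEC =====
-- Pre_ excludes exactly the inputs on which Python A raises IndexError: some element of
-- numberList has fewer than 2 components, so n[1] fails.
def Pre_filter_real (numberList : List (List Int)) (undoList : List (List (List Int))) : Prop :=
  ∀ x ∈ numberList, 2 ≤ x.length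
instance (numberList : List (List Int)) (undoList : List (List (List Int))) : Decidable (Pre_filter_real numberList undoList) := by unfold Pre_filter_real; infer_instance

def pvWitness_filter_real : List (List Int) × List (List (List Int)) := ([[1, 0], [2, 3], [0, 0]], [[[5, 5]]])

def Spec_filter_real (numberList : List (List Int)) (undoList : List (List (List Int))) (out : List (List Int) × List (List (List Int))) : Prop := out = filter_real_alt numberList undoList
instance (numberList : List (List Int)) (undoList : List (List (List Int))) (out : List (List Int) × List (List (List Int))) : Decidable (Spec_filter_real numberList undoList out) := by unfold Spec_filter_real; infer_instance

-- ===== CLAIM (what is proved, stated in full; the proofs are below) =====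
def Claim_equal_filter_real : Prop := ∀ (numberList : List (List Int)) (undoList : List (List (List Int))), Dom_filter_real numberList undoList → Pre_filter_real numberList undoList → Spec_filter_real numberList undoList (filter_real numberList undoList)

-- ===== LEMMAS AND PROOFS =====

-- the predicate both programs filter by: "second component is 0"
def pvIsReal (x : List Int) : Bool := PySem.List.pyGet? x 1 == some 0

lemma pvGet_isReal {x : List Int} (h : 2 ≤ x.length) :
    PySem.List.pyGet? x 1 = some x[1] := by
  exact PySem.List.pyGet?_ofNat x 1 (by omega)

-- A's loop produces take i ++ filter of the rest
lemma pvLoopA_eq : ∀ (k : ℕ) (lst : List (List Int)) (i : ℕ), lst.length - i = k →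
    (∀ x ∈ lst, 2 ≤ x.length) →
    pvFilterLoopA lst i = lst.take i ++ (lst.drop i).filter pvIsReal := by
  intro k
  induction k with
  | zero =>
    intro lst i hk _
    rw [pvFilterLoopA]
    have hle : lst.length ≤ i := by omega
    simp [Nat.not_lt.mpr hle, List.take_of_length_le hle, List.drop_of_length_le hle]
  | succ k ih =>
    intro lst i hk hpre
    have hi : i < lst.length := by omega
    have h2 : 2 ≤ lst[i].length := hpre _ (lst.getElem_mem hi)
    rw [pvFilterLoopA]
    simp only [dif_pos hi, pvGetComplex, pvGet_isReal h2]
    have hdrop : lst.drop i = lst[i] :: lst.drop (i + 1) := List.drop_eq_getElem_cons hi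
    by_cases hv : lst[i][1] = 0
    · rw [if_neg (not_not.mpr hv), ih lst (i + 1) (by omega) hpre]
      have hp : pvIsReal lst[i] = true := by
        simp [pvIsReal, pvGet_isReal h2, hv]
      rw [hdrop, List.filter_cons, hp, if_pos rfl, List.take_add_one,
          List.getElem?_eq_getElem hi]
      rw [Option.toList_some, List.append_assoc, List.singleton_append]
    · rw [if_pos hv]
      have hmem : ∀ x ∈ lst.eraseIdx i, 2 ≤ x.length :=
        fun x hx => hpre x (List.mem_of_mem_eraseIdx hx)
      have hlen : (lst.eraseIdx i).length = lst.length - 1 := by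
        simp [List.length_eraseIdx, hi]
      rw [ih (lst.eraseIdx i) i (by omega) hmem]
      have htk : (lst.take i).length = i := by simp; omega
      rw [List.eraseIdx_eq_take_drop_succ, List.take_left' htk, List.drop_left' htk]
      have hp : pvIsReal lst[i] = false := by
        simp [pvIsReal, pvGet_isReal h2, hv]
      rw [hdrop, List.filter_cons, hp]
      simp

-- B's loop invariant: write prefix = filter of the read prefix, tail untouched
lemma pvLoopB_eq (nl : List (List Int)) (hpre : ∀ x ∈ nl, 2 ≤ x.length) :
    ∀ (k : ℕ) (arr : List (List Int)) (w r : ℕ), nl.length - r = k →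
    arr.length = nl.length → w ≤ r →
    arr.take w = (nl.take r).filter pvIsReal → arr.drop r = nl.drop r →
    (pvFilterLoopB arr w r nl.length).1.take (pvFilterLoopB arr w r nl.length).2
      = nl.filter pvIsReal := by
  intro k
  induction k with
  | zero =>
    intro arr w r hk hlen hwr htake hdrop
    rw [pvFilterLoopB]
    have hle : nl.length ≤ r := by omega
    simp only [if_neg (Nat.not_lt.mpr hle)]
    rw [htake, List.take_of_length_le hle]
  | succ k ih =>
    intro arr w r hk hlen hwr htake hdrop
    have hr : r < nl.length := by omega
    have hra : r < arr.length := by omega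
    have harr_r : arr[r] = nl[r] := by
      have h0 : (arr.drop r)[0]'(by simp; omega) = (nl.drop r)[0]'(by simp; omega) := by
        simp [hdrop]
      simpa using h0
    have hgetD : arr.getD r [] = nl[r] := by
      rw [List.getD_eq_getElem _ _ hra, harr_r]
    have h2 : 2 ≤ nl[r].length := hpre _ (nl.getElem_mem hr)
    rw [pvFilterLoopB]
    simp only [if_pos hr, hgetD, pvGet_isReal h2]
    have hdropsucc : arr.drop (r + 1) = nl.drop (r + 1) := by
      have := congrArg (List.drop 1) hdrop
      simpa [List.drop_drop] using this
    have htksucc : nl.take (r + 1) = nl.take r ++ [nl[r]] := by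
      rw [List.take_add_one, List.getElem?_eq_getElem hr]
      simp
    by_cases hv : nl[r][1] = 0
    · rw [if_pos hv]
      have hwa : w < arr.length := by omega
      apply ih (arr.set w nl[r]) (w + 1) (r + 1) (by omega) (by simp [hlen]) (by omega)
      · have hset : arr.set w nl[r] = (arr.take w ++ [nl[r]]) ++ arr.drop (w + 1) := by
          rw [List.set_eq_take_append_cons_drop, if_pos hwa]; simp
        have hlw : (arr.take w ++ [nl[r]]).length = w + 1 := by simp; omega
        rw [hset, List.take_left' hlw]
        have hp : pvIsReal nl[r] = true := by simp [pvIsReal, pvGet_isReal h2, hv]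
        rw [htksucc, List.filter_append, List.filter_cons, hp, htake]
        simp
      · rw [List.drop_set_of_lt (by omega), hdropsucc]
    · rw [if_neg hv]
      apply ih arr w (r + 1) (by omega) hlen (by omega)
      · have hp : pvIsReal nl[r] = false := by simp [pvIsReal, pvGet_isReal h2, hv]
        rw [htksucc, List.filter_append, List.filter_cons, hp, htake]
        simp
      · exact hdropsucc

-- ===== VERDICT (by name: the statement is the Claim_ definition above) =====
theorem filter_real_spec : Claim_equal_filter_real := by
  intro nl ul _ hpre
  show filter_real nl ul = filter_real_alt nl ul
  unfold filter_real filter_real_alt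
  rw [pvLoopA_eq (nl.length - 0) nl 0 rfl hpre,
      pvLoopB_eq nl hpre (nl.length - 0) nl 0 0 rfl rfl (by omega) (by simp) rfl]
  simp
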